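-- pv_equiv track=rewrite | github.com/junjongwook/programmers | Code Challenge Season 1/s68938.py | solution
-- ===== SOURCE A (Python) =====
-- def solution(s):
--     answer = -1
--     n = len(s)
--     point = [[0] * n for _ in range(n)]
--     for _s in range(n): # 부분 문자열의 시작 위치
--         for _e in range(_s, n): # 부분 문자열의 끝 위치
--             if _s == _e: continue   # 같은 위치를 가르키면 0
--             if s[_s] != s[_e]:      # 최대 거리의 값들이 다르면 그 거리만큼
--                 point[_s][_e] = _e - _s
--                 continue
--             _max = _e - _s - 1      # 최대 거리 보다 하나 아래부터
--             _pre = point[_s][_e-1]  # 이전 최대 거리 값보다는 크거나 같을 거라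
--             check = False           # 최대 거리를 찾는지?
--             for _l in range(_max, _pre, -1):    # 거리를 좁혀 가면서...
--                 for _s2 in range(_s, _e - _l):
--                     if s[_s2] != s[_s2 + _l]:
--                         point[_s][_e] = _l
--                         check = True
--                         break
--                 if check: break
--             if not check:
--                 point[_s][_e] = _pre
--
--     answer = sum([sum(p) for p in point])
--
--     return answer
-- ===== SOURCE B (Python) =====
-- def solution(s):
--     # Interval DP by rows from the bottom: g(i,j) = max distance j-i over
--     # mismatched pairs inside s[i..j]; the value A's table stores for (i,j)
--     # is j-i if s[i]!=s[j] else g(i,j-1).  O(n^2) instead of A's O(n^4).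
--     n = len(s)
--     total = 0
--     nxt = []  # nxt[d] = g(i+1, i+1+d)
--     for i in range(n - 1, -1, -1):
--         row = [0]  # row[d] = g(i, i+d)
--         for j in range(i + 1, n):
--             if s[i] != s[j]:
--                 total += j - i
--                 row.append(max(row[j - i - 1], nxt[j - i - 1], j - i))
--             else:
--                 total += row[j - i - 1]
--                 row.append(max(row[j - i - 1], nxt[j - i - 1]))
--         nxt = row
--     return total
-- ===== Notes on version B (the rewrite author's own statement) =====
-- stated objective: faster
-- what changed: Replaces A's per-cell descending distance search with its inner pair scan (quadruple loop) by an O(n^2) interval DP computing the max mismatched-pair distance g(i,j)=max(g(i,j-1),g(i+1,j),j-i if s[i]!=s[j]) row by row from the bottom.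
import Mathlib
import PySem

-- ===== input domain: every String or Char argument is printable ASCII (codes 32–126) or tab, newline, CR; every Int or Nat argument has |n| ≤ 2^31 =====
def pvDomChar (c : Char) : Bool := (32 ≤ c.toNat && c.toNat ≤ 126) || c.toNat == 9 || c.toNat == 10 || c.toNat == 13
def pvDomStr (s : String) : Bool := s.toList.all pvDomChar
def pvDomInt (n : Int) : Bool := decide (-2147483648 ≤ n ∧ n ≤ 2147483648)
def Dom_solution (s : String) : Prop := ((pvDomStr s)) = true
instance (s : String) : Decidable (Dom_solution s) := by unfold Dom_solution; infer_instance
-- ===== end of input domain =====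

-- B replaces A's per-cell descending distance search (a quadruple loop) by an
-- interval DP on the max mismatched-pair distance; same return value.

-- ===== PORT A =====
-- 'for _s2 in range(_s, _e - _l): if s[_s2] != s[_s2 + _l]: … break'
-- (every index touched is in range on the calls made, so getD is exact there)
def aScan (c : List Char) (l i stop : Nat) : Bool :=
  (List.range' i (stop - i)).any (fun k => c.getD k ' ' != c.getD (k + l) ' ')

-- 'for _l in range(_max, _pre, -1): …' returning the first _l whose scan hits
def aFind (c : List Char) (s e pre : Nat) : Nat → Option Nat
  | 0 => none
  | l + 1 =>
      if pre < l + 1 then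
        if aScan c (l + 1) s (e - (l + 1)) then some (l + 1) else aFind c s e pre l
      else none

-- the body of the (_s, _e) iteration, point[_s][_e-1] passed in as pre
def aCell (c : List Char) (s e pre : Nat) : Nat :=
  if c.getD s ' ' ≠ c.getD e ' ' then e - s
  else
    match aFind c s e pre (e - s - 1) with
    | some l => l
    | none => pre

-- row _s: e runs over range(_s, n) (e = _s contributes 0); state = (point[_s][_e-1], row sum)
def aRow (c : List Char) (n sIdx : Nat) : Nat :=
  ((List.range' (sIdx + 1) (n - (sIdx + 1))).foldl
    (fun st e => (aCell c sIdx e st.1, st.2 + aCell c sIdx e st.1)) (0, 0)).2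

def solution (s : String) : Int :=
  let c := s.toList
  let n := c.length
  (((List.range n).map (fun sIdx => aRow c n sIdx)).sum : Nat)

-- ===== PORT B =====
-- one j-iteration of Source B's inner loop; state = (row, total)
def bStep (c : List Char) (i : Nat) (nxt : List Nat) (st : List Nat × Nat) (j : Nat) :
    List Nat × Nat :=
  if c.getD i ' ' ≠ c.getD j ' ' then
    (st.1 ++ [max (st.1.getD (j - i - 1) 0) (max (nxt.getD (j - i - 1) 0) (j - i))],
     st.2 + (j - i))
  else
    (st.1 ++ [max (st.1.getD (j - i - 1) 0) (nxt.getD (j - i - 1) 0)],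
     st.2 + st.1.getD (j - i - 1) 0)

-- 'for j in range(i + 1, n): …' starting from row = [0]
def bRow (c : List Char) (n i : Nat) (nxt : List Nat) (total : Nat) : List Nat × Nat :=
  (List.range' (i + 1) (n - (i + 1))).foldl (bStep c i nxt) ([0], total)

-- 'for i in range(n - 1, -1, -1): …' (k+1 processes i = k, then recurses)
def bLoop (c : List Char) (n : Nat) : Nat → List Nat → Nat → Nat
  | 0, _, total => total
  | k + 1, nxt, total => bLoop c n k (bRow c n k nxt total).1 (bRow c n k nxt total).2

def solution_alt (s : String) : Int :=
  let c := s.toList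
  (bLoop c c.length c.length [] 0 : Nat)

-- ===== PRECONDITION & SPEC =====
def Spec_solution (s : String) (out : Int) : Prop := out = solution_alt s
instance (s : String) (out : Int) : Decidable (Spec_solution s out) := by unfold Spec_solution; infer_instance

-- ===== CLAIM (what is proved, stated in full; the proofs are below) =====
def Claim_equal_solution : Prop := ∀ (s : String), Dom_solution s → Spec_solution s (solution s)

-- ===== LEMMAS AND PROOFS =====

-- contribution of the pair (i, j) to the max mismatched-pair distance
def gterm (c : List Char) (i j : Nat) : Nat :=
  if c.getD i ' ' ≠ c.getD j ' ' then j - i else 0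

-- the semantic yardstick: max distance j - i over mismatched pairs inside c[s..t]
def gsp (c : List Char) (s t : Nat) : Nat :=
  (Finset.Icc s t).sup (fun i => (Finset.Icc s t).sup (gterm c i))

-- the value A's table stores at (s,e) (and which B sums)
def Pv (c : List Char) (s e : Nat) : Nat :=
  if e ≤ s then 0
  else if c.getD s ' ' ≠ c.getD e ' ' then e - s else gsp c s (e - 1)

lemma gterm_le_gsp (c : List Char) {s t i j : Nat} (hi : s ≤ i ∧ i ≤ t) (hj : s ≤ j ∧ j ≤ t) :
    gterm c i j ≤ gsp c s t := by
  have hi' : i ∈ Finset.Icc s t := Finset.mem_Icc.mpr hi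
  have hj' : j ∈ Finset.Icc s t := Finset.mem_Icc.mpr hj
  exact le_trans (Finset.le_sup (f := gterm c i) hj')
    (Finset.le_sup (f := fun i => (Finset.Icc s t).sup (gterm c i)) hi')

lemma gterm_of_ne (c : List Char) {i j : Nat} (h : c.getD i ' ' ≠ c.getD j ' ') :
    gterm c i j = j - i := by
  unfold gterm; rw [if_pos h]

lemma gterm_of_eq (c : List Char) {i j : Nat} (h : ¬ c.getD i ' ' ≠ c.getD j ' ') :
    gterm c i j = 0 := by
  unfold gterm; rw [if_neg h]

lemma gsp_mono (c : List Char) {s s' t t' : Nat} (hs : s' ≤ s) (ht : t ≤ t') :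
    gsp c s t ≤ gsp c s' t' := by
  unfold gsp
  refine Finset.sup_le fun i hi => Finset.sup_le fun j hj => ?_
  simp only [Finset.mem_Icc] at hi hj
  exact gterm_le_gsp c ⟨by omega, by omega⟩ ⟨by omega, by omega⟩

lemma gsp_le (c : List Char) (s t : Nat) : gsp c s t ≤ t - s := by
  unfold gsp
  refine Finset.sup_le fun i hi => Finset.sup_le fun j hj => ?_
  simp only [Finset.mem_Icc] at hi hj
  unfold gterm; split_ifs <;> omega

lemma pair_le_gsp (c : List Char) {s t k l : Nat} (hk : s ≤ k) (hkl : k + l ≤ t)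
    (hne : c.getD k ' ' ≠ c.getD (k + l) ' ') : l ≤ gsp c s t := by
  have h1 : gterm c k (k + l) ≤ gsp c s t :=
    gterm_le_gsp c ⟨hk, by omega⟩ ⟨by omega, hkl⟩
  rw [gterm_of_ne c hne] at h1
  have h2 : k + l - k = l := by omega
  rw [h2] at h1
  exact h1

lemma gsp_attain (c : List Char) {s t : Nat} (h : 0 < gsp c s t) :
    ∃ k, s ≤ k ∧ k + gsp c s t ≤ t ∧ c.getD k ' ' ≠ c.getD (k + gsp c s t) ' ' := by
  have hne : (Finset.Icc s t).Nonempty := by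
    by_contra h'
    rw [Finset.not_nonempty_iff_eq_empty] at h'
    rw [gsp, h'] at h; simp at h
  obtain ⟨i, hi, hieq⟩ := Finset.exists_mem_eq_sup (Finset.Icc s t) hne
    (fun i => (Finset.Icc s t).sup (gterm c i))
  obtain ⟨j, hj, hjeq⟩ := Finset.exists_mem_eq_sup (Finset.Icc s t) hne (gterm c i)
  have hg2 : gsp c s t = gterm c i j := by rw [gsp, hieq, hjeq]
  simp only [Finset.mem_Icc] at hi hj
  by_cases hmm : c.getD i ' ' ≠ c.getD j ' '
  · have hv : gterm c i j = j - i := gterm_of_ne c hmm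
    rw [hg2, hv] at h ⊢
    refine ⟨i, hi.1, by omega, ?_⟩
    have hij : i + (j - i) = j := by omega
    rw [hij]; exact hmm
  · exfalso
    rw [hg2, gterm_of_eq c hmm] at h
    exact Nat.lt_irrefl 0 h

lemma gsp_diag (c : List Char) (s : Nat) : gsp c s s = 0 := by
  have := gsp_le c s s; omega

lemma Pv_le_gsp (c : List Char) (s m : Nat) : Pv c s m ≤ gsp c s m := by
  unfold Pv
  split_ifs with h1 h2
  · exact Nat.zero_le _
  · refine pair_le_gsp c (le_refl s) (by omega) ?_
    have hsm : s + (m - s) = m := by omega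
    rw [hsm]; exact h2
  · exact gsp_mono c (le_refl s) (by omega)

-- interval-DP recurrence for gsp
lemma gsp_rec (c : List Char) {s t : Nat} (hst : s ≤ t) :
    gsp c s (t + 1) = max (gsp c s t) (max (gsp c (s + 1) (t + 1)) (gterm c s (t + 1))) := by
  apply le_antisymm
  · rw [gsp]
    refine Finset.sup_le fun i hi => Finset.sup_le fun j hj => ?_
    simp only [Finset.mem_Icc] at hi hj
    by_cases hjt : j ≤ t
    · by_cases hit : i ≤ t
      · exact le_trans (gterm_le_gsp c ⟨hi.1, hit⟩ ⟨hj.1, hjt⟩) (le_max_left _ _)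
      · have h0 : gterm c i j ≤ 0 := by unfold gterm; split_ifs <;> omega
        exact le_trans h0 (Nat.zero_le _)
    · have hj1 : j = t + 1 := by omega
      by_cases his : s = i
      · subst his; subst hj1
        exact le_trans (le_max_right _ _) (le_max_right _ _)
      · by_cases hit : i ≤ t + 1
        · have hg : gterm c i j ≤ gsp c (s + 1) (t + 1) :=
            gterm_le_gsp c ⟨by omega, hit⟩ ⟨by omega, by omega⟩
          exact le_trans hg (le_trans (le_max_left _ _) (le_max_right _ _))
        · omega
  · refine max_le (gsp_mono c (le_refl _) (by omega))
      (max_le (gsp_mono c (by omega) (le_refl _)) ?_)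
    exact gterm_le_gsp c ⟨le_refl s, by omega⟩ ⟨by omega, le_refl _⟩

-- existence of a mismatched pair at distance l inside c[s..t]
def QP (c : List Char) (l s t : Nat) : Prop :=
  ∃ k, s ≤ k ∧ k + l ≤ t ∧ c.getD k ' ' ≠ c.getD (k + l) ' '

lemma aScan_iff (c : List Char) {l : Nat} (s e : Nat) (hl : 1 ≤ l) :
    aScan c l s (e - l) = true ↔ QP c l s (e - 1) := by
  unfold aScan QP
  simp only [List.any_eq_true, List.mem_range'_1, bne_iff_ne]
  constructor
  · rintro ⟨k, ⟨hk1, hk2⟩, hne⟩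
    exact ⟨k, hk1, by omega, hne⟩
  · rintro ⟨k, hk1, hk2, hne⟩
    exact ⟨k, ⟨hk1, by omega⟩, hne⟩

lemma aFind_eq (c : List Char) (s e : Nat) (G : Nat)
    (hub : ∀ l, G < l → ¬ QP c l s (e - 1))
    (hat : ∀ pre, pre < G → QP c G s (e - 1)) :
    ∀ (M pre : Nat), pre ≤ G → G ≤ M →
    (match aFind c s e pre M with | some l => l | none => pre) = G := by
  intro M
  induction M with
  | zero =>
    intro pre h1 h2
    show pre = G
    omega
  | succ m ih =>
    intro pre h1 h2
    simp only [aFind]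
    by_cases hpre : pre < m + 1
    · rw [if_pos hpre]
      by_cases hsc : aScan c (m + 1) s (e - (m + 1)) = true
      · rw [if_pos hsc]
        have hqp : QP c (m + 1) s (e - 1) := (aScan_iff c s e (by omega)).mp hsc
        have hle : ¬ (G < m + 1) := fun h => hub _ h hqp
        show m + 1 = G
        omega
      · rw [if_neg hsc]
        have hGm : G ≤ m := by
          by_contra h
          have hG : G = m + 1 := by omega
          have hq : QP c G s (e - 1) := hat pre (by omega)
          rw [hG] at hq
          exact hsc ((aScan_iff c s e (by omega)).mpr hq)
        exact ih pre h1 hGm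
    · rw [if_neg hpre]
      show pre = G
      omega

-- A's cell value, given that pre carries the previous cell's value
lemma aCell_eq (c : List Char) {s e : Nat} (hse : s < e) :
    aCell c s e (Pv c s (e - 1)) = Pv c s e := by
  have hPv : Pv c s e = if c.getD s ' ' ≠ c.getD e ' ' then e - s else gsp c s (e - 1) := by
    unfold Pv; rw [if_neg (by omega : ¬ e ≤ s)]
  unfold aCell
  by_cases hmm : c.getD s ' ' ≠ c.getD e ' '
  · rw [if_pos hmm, hPv, if_pos hmm]
  · rw [if_neg hmm, hPv, if_neg hmm]
    refine aFind_eq c s e (gsp c s (e - 1)) (fun l hl hqp => ?_) (fun pre hpre => ?_)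
      (e - s - 1) _ (Pv_le_gsp c s (e - 1)) ?_
    · obtain ⟨k, hk1, hk2, hne⟩ := hqp
      exact absurd (pair_le_gsp c hk1 hk2 hne) (by omega)
    · obtain ⟨k, hk1, hk2, hne⟩ := gsp_attain c (s := s) (t := e - 1) (by omega)
      exact ⟨k, hk1, hk2, hne⟩
    · have := gsp_le c s (e - 1); omega

-- ===== A-side accumulation =====
lemma aRow_aux (c : List Char) (sIdx : Nat) :
    ∀ (m e0 t : Nat), sIdx < e0 →
    ((List.range' e0 m).foldl
      (fun st e => (aCell c sIdx e st.1, st.2 + aCell c sIdx e st.1))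
      (Pv c sIdx (e0 - 1), t)).2
      = t + ((List.range' e0 m).map (Pv c sIdx)).sum := by
  intro m
  induction m with
  | zero => intro e0 t _; simp
  | succ m ih =>
    intro e0 t he0
    rw [List.range'_succ]
    simp only [List.foldl_cons, List.map_cons, List.sum_cons]
    rw [aCell_eq c he0]
    have he : Pv c sIdx e0 = Pv c sIdx ((e0 + 1) - 1) := by norm_num
    rw [he, ih (e0 + 1) (t + Pv c sIdx ((e0 + 1) - 1)) (by omega)]
    omega

lemma aRow_eq (c : List Char) (n sIdx : Nat) :
    aRow c n sIdx = ((List.range' (sIdx + 1) (n - (sIdx + 1))).map (Pv c sIdx)).sum := by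
  unfold aRow
  have h0 : ((0, 0) : Nat × Nat) = (Pv c sIdx ((sIdx + 1) - 1), 0) := by
    simp [Pv]
  rw [h0, aRow_aux c sIdx (n - (sIdx + 1)) (sIdx + 1) 0 (by omega)]
  omega

-- ===== B-side accumulation =====
lemma bRow_aux (c : List Char) (n i : Nat) :
    ∀ (m j0 t : Nat), i < j0 → j0 + m ≤ n →
    ((List.range' j0 m).foldl
      (bStep c i ((List.range (n - (i + 1))).map (fun d => gsp c (i + 1) (i + 1 + d))))
      ((List.range (j0 - i)).map (fun d => gsp c i (i + d)), t))
      = ((List.range (j0 + m - i)).map (fun d => gsp c i (i + d)),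
         t + ((List.range' j0 m).map (Pv c i)).sum) := by
  intro m
  induction m with
  | zero => intro j0 t _ _; simp
  | succ m ih =>
    intro j0 t hij h_n
    rw [List.range'_succ]
    simp only [List.foldl_cons, List.map_cons, List.sum_cons]
    have hrowget : ((List.range (j0 - i)).map (fun d => gsp c i (i + d))).getD (j0 - i - 1) 0
        = gsp c i (j0 - 1) := by
      rw [List.getD_eq_getElem?_getD, List.getElem?_map, List.getElem?_range (by omega)]
      simp only [Option.map_some, Option.getD_some]
      congr 1; omega
    have hnxtget : ((List.range (n - (i + 1))).map (fun d => gsp c (i + 1) (i + 1 + d))).getD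
        (j0 - i - 1) 0 = gsp c (i + 1) j0 := by
      rw [List.getD_eq_getElem?_getD, List.getElem?_map, List.getElem?_range (by omega)]
      simp only [Option.map_some, Option.getD_some]
      congr 1; omega
    have hrec : gsp c i j0
        = max (gsp c i (j0 - 1)) (max (gsp c (i + 1) j0) (gterm c i j0)) := by
      have h1 : j0 - 1 + 1 = j0 := by omega
      have h2 := gsp_rec c (s := i) (t := j0 - 1) (by omega)
      rw [h1] at h2; exact h2
    have hext : (List.range (j0 - i)).map (fun d => gsp c i (i + d)) ++ [gsp c i j0]
        = (List.range (j0 + 1 - i)).map (fun d => gsp c i (i + d)) := by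
      have h1 : j0 + 1 - i = (j0 - i) + 1 := by omega
      rw [h1, List.range_succ, List.map_append, List.map_singleton]
      have h2 : i + (j0 - i) = j0 := by omega
      rw [h2]
    have hstep : bStep c i ((List.range (n - (i + 1))).map (fun d => gsp c (i + 1) (i + 1 + d)))
        ((List.range (j0 - i)).map (fun d => gsp c i (i + d)), t) j0
        = ((List.range (j0 + 1 - i)).map (fun d => gsp c i (i + d)), t + Pv c i j0) := by
      unfold bStep
      by_cases hmm : c.getD i ' ' ≠ c.getD j0 ' '
      · rw [if_pos hmm]
        simp only [hrowget, hnxtget]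
        have hval : max (gsp c i (j0 - 1)) (max (gsp c (i + 1) j0) (j0 - i)) = gsp c i j0 := by
          rw [hrec, gterm_of_ne c hmm]
        rw [hval, hext]
        have hpv : Pv c i j0 = j0 - i := by
          unfold Pv; rw [if_neg (by omega : ¬ j0 ≤ i), if_pos hmm]
        rw [hpv]
      · rw [if_neg hmm]
        simp only [hrowget, hnxtget]
        have hval : max (gsp c i (j0 - 1)) (gsp c (i + 1) j0) = gsp c i j0 := by
          rw [hrec, gterm_of_eq c hmm]; omega
        rw [hval, hext]
        have hpv : Pv c i j0 = gsp c i (j0 - 1) := by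
          unfold Pv; rw [if_neg (by omega : ¬ j0 ≤ i), if_neg hmm]
        rw [hpv]
    rw [hstep, ih (j0 + 1) (t + Pv c i j0) (by omega) (by omega)]
    have harith : j0 + 1 + m - i = j0 + (m + 1) - i := by omega
    rw [harith]
    simp only [Prod.mk.injEq, true_and]
    omega

lemma bRow_eq (c : List Char) (n i : Nat) (t : Nat) (hin : i + 1 ≤ n) :
    bRow c n i ((List.range (n - (i + 1))).map (fun d => gsp c (i + 1) (i + 1 + d))) t
      = ((List.range (n - i)).map (fun d => gsp c i (i + d)),
         t + ((List.range' (i + 1) (n - (i + 1))).map (Pv c i)).sum) := by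
  unfold bRow
  have h1 : ([0] : List Nat) = (List.range ((i + 1) - i)).map (fun d => gsp c i (i + d)) := by
    simp [gsp_diag]
  rw [h1, bRow_aux c n i (n - (i + 1)) (i + 1) t (by omega) (by omega)]
  have h2 : i + 1 + (n - (i + 1)) - i = n - i := by omega
  rw [h2]

lemma bLoop_eq (c : List Char) (n : Nat) :
    ∀ (k : Nat), k ≤ n → ∀ (t : Nat),
    bLoop c n k ((List.range (n - k)).map (fun d => gsp c k (k + d))) t
      = t + ((List.range k).map
          (fun i => ((List.range' (i + 1) (n - (i + 1))).map (Pv c i)).sum)).sum := by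
  intro k
  induction k with
  | zero => intro _ t; simp [bLoop]
  | succ k ih =>
    intro hk t
    simp only [bLoop]
    rw [bRow_eq c n k t (by omega)]
    rw [ih (by omega)]
    rw [List.range_succ, List.map_append, List.sum_append, List.map_singleton,
      List.sum_singleton]
    omega

-- ===== assembling both sides =====
lemma solution_eq_sum (s : String) :
    solution s = (((List.range s.toList.length).map
      (fun i => ((List.range' (i + 1) (s.toList.length - (i + 1))).map (Pv s.toList i)).sum)).sum : Nat) := by
  show ((((List.range s.toList.length).map
      (fun sIdx => aRow s.toList s.toList.length sIdx)).sum : Nat) : Int) = _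
  simp only [aRow_eq]

lemma solution_alt_eq_sum (s : String) :
    solution_alt s = (((List.range s.toList.length).map
      (fun i => ((List.range' (i + 1) (s.toList.length - (i + 1))).map (Pv s.toList i)).sum)).sum : Nat) := by
  show ((bLoop s.toList s.toList.length s.toList.length [] 0 : Nat) : Int) = _
  have h0 : ([] : List Nat) = (List.range (s.toList.length - s.toList.length)).map
      (fun d => gsp s.toList s.toList.length (s.toList.length + d)) := by simp
  rw [h0, bLoop_eq s.toList s.toList.length s.toList.length (le_refl _) 0, Nat.zero_add]

-- ===== VERDICT (by name: the statement is the Claim_ definition above) =====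
theorem solution_spec : Claim_equal_solution := by
  intro s _
  show solution s = solution_alt s
  rw [solution_eq_sum, solution_alt_eq_sum]
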